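-- pv_equiv track=rewrite | github.com/Ahemad7429/Problem-Solving | session_tests/sessiojn_test.py | flip_bit_to_win
-- ===== SOURCE A (Python) =====
-- def flip_bit_to_win(x):
--     # Convert x to binary string without '0b' prefix
--     binary_str = bin(x)[2:]
--
--     # Split by '0' to get lengths of consecutive '1' segments
--     segments = binary_str.split('0')
--
--     # If there's no '0' in the binary representation, return the length of the whole binary string
--     if len(segments) == 1:
--         return len(binary_str)
--
--     # Otherwise, calculate the maximum length possible by flipping one '0'
--     max_length = 0
--
--     for i in range(len(segments) - 1):
--         # Length by flipping the zero between segments[i] and segments[i+1]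
--         combined_length = len(segments[i]) + 1 + len(segments[i + 1])
--         max_length = max(max_length, combined_length)
--
--     return max_length
-- ===== SOURCE B (Python) =====
-- def flip_bit_to_win(x):
--     binary_str = bin(x)[2:]
--     if '0' not in binary_str:
--         return len(binary_str)
--     best = 0
--     cur = 0
--     prev = None
--     for ch in binary_str:
--         if ch == '0':
--             if prev is not None:
--                 best = max(best, prev + cur + 1)
--             prev = cur
--             cur = 0
--         else:
--             cur += 1
--     best = max(best, prev + cur + 1)
--     return best
-- ===== Notes on version B (the rewrite author's own statement) =====
-- stated objective: simpler
-- what changed: Replaces the materialized split('0') list and the index loop over adjacent segment pairs with a single streaming pass over the characters that maintains the current and previous run lengths and merges them at each '0'.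
import Mathlib
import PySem

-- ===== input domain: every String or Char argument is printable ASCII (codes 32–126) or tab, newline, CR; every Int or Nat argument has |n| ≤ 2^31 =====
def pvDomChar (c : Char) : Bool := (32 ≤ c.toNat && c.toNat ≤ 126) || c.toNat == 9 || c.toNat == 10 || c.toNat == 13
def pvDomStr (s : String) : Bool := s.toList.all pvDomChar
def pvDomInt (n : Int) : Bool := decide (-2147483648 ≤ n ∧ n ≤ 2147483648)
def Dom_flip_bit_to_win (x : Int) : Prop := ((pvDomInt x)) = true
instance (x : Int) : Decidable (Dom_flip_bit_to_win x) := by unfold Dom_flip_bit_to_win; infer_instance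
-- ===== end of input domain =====

-- B replaces A's materialized split('0') list and index loop over adjacent segment pairs
-- with a single streaming pass keeping the current and previous run lengths (objective: simpler).


-- ===== PORT A =====
def flip_bit_to_win (x : Int) : Int :=
  -- binary_str = bin(x)[2:]
  let binary_str := PySem.Chars.slice (PySem.Int.toBinChars0b x) (some 2) none
  -- segments = binary_str.split('0')
  let segments := PySem.Chars.splitOn binary_str ['0']
  if PySem.List.len segments = 1 then PySem.List.len binary_str
  else
    -- for i in range(len(segments) - 1): max_length = max(max_length, len(segments[i]) + 1 + len(segments[i+1]))
    (PySem.List.pyRange 0 (PySem.List.len segments - 1) 1).foldl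
      (fun max_length i =>
        let combined_length :=
          PySem.List.len (PySem.List.pyGetD segments i []) + 1 +
          PySem.List.len (PySem.List.pyGetD segments (i + 1) [])
        max max_length combined_length) 0

-- ===== PORT B =====
def flip_bit_to_win_alt (x : Int) : Int :=
  -- binary_str = bin(x)[2:]
  let binary_str := PySem.Chars.slice (PySem.Int.toBinChars0b x) (some 2) none
  -- if '0' not in binary_str: return len(binary_str)
  if PySem.Chars.isIn ['0'] binary_str = false then PySem.List.len binary_str
  else
    -- one pass: state = (best, cur, prev)
    let st := binary_str.foldl
      (fun (st : Int × Int × Option Int) ch =>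
        if ch = '0' then
          ((match st.2.2 with
            | some p => max st.1 (p + st.2.1 + 1)
            | none => st.1), 0, some st.2.1)
        else (st.1, st.2.1 + 1, st.2.2)) (0, 0, none)
    -- best = max(best, prev + cur + 1)  (prev is an int here: the guard put a '0' in the string;
    -- the 'none' arm is unreachable and returns best)
    match st.2.2 with
    | some p => max st.1 (p + st.2.1 + 1)
    | none => st.1

-- ===== PRECONDITION & SPEC =====
def Spec_flip_bit_to_win (x : Int) (out : Int) : Prop := out = flip_bit_to_win_alt x
instance (x : Int) (out : Int) : Decidable (Spec_flip_bit_to_win x out) := by unfold Spec_flip_bit_to_win; infer_instance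

-- ===== CLAIM (what is proved, stated in full; the proofs are below) =====
def Claim_equal_flip_bit_to_win : Prop := ∀ (x : Int), Dom_flip_bit_to_win x → Spec_flip_bit_to_win x (flip_bit_to_win x)

-- ===== LEMMAS AND PROOFS =====

-- reference splitter: binary_str.split('0') computed by structural recursion
def split0 : List Char → List (List Char)
  | [] => [[]]
  | c :: rest =>
    if c = '0' then [] :: split0 rest
    else match split0 rest with
      | s :: ss => (c :: s) :: ss
      | [] => [[c]]

-- prepend a prefix onto the head piece
def consHead (p : List Char) : List (List Char) → List (List Char)
  | s :: ss => (p ++ s) :: ss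
  | [] => []

lemma split0_ne_nil (cs : List Char) : split0 cs ≠ [] := by
  cases cs with
  | nil => simp [split0]
  | cons c rest =>
    simp only [split0]
    split_ifs
    · simp
    · cases h : split0 rest <;> simp

lemma splitOn_go_eq (l : List Char) : ∀ (fuel : Nat) (cur : List Char) (acc : List (List Char)),
    l.length ≤ fuel →
    PySem.Chars.splitOn.go ['0'] fuel l cur acc = acc.reverse ++ consHead cur.reverse (split0 l) := by
  induction l with
  | nil =>
    intro fuel cur acc _
    cases fuel <;> simp [PySem.Chars.splitOn.go, split0, consHead]
  | cons c rest ih =>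
    intro fuel cur acc hle
    cases fuel with
    | zero => simp at hle
    | succ f =>
      simp only [PySem.Chars.splitOn.go]
      by_cases hc : c = '0'
      · subst hc
        rw [if_pos (by simp [List.isPrefixOf]),
            show List.drop ['0'].length ('0' :: rest) = rest from by simp]
        rw [ih f [] ((cur.reverse) :: acc) (by simpa using Nat.lt_succ_iff.mp (Nat.lt_of_lt_of_le (Nat.lt_succ_of_le le_rfl) (by simpa using hle)))]
        obtain ⟨s, ss, hss⟩ : ∃ s ss, split0 rest = s :: ss := by
          cases h : split0 rest with
          | nil => exact absurd h (split0_ne_nil rest)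
          | cons s ss => exact ⟨s, ss, rfl⟩
        simp [split0, hss, consHead]
      · rw [if_neg (by simp [List.isPrefixOf]; intro h; exact hc h.symm)]
        rw [ih f (c :: cur) acc (by simpa using Nat.succ_le_succ_iff.mp hle)]
        obtain ⟨s, ss, hss⟩ : ∃ s ss, split0 rest = s :: ss := by
          cases h : split0 rest with
          | nil => exact absurd h (split0_ne_nil rest)
          | cons s ss => exact ⟨s, ss, rfl⟩
        simp [split0, hc, hss, consHead]

lemma splitOn_eq_split0 (cs : List Char) : PySem.Chars.splitOn cs ['0'] = split0 cs := by
  unfold PySem.Chars.splitOn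
  rw [splitOn_go_eq cs (cs.length + 1) [] [] (Nat.le_succ _)]
  obtain ⟨s, ss, hss⟩ : ∃ s ss, split0 cs = s :: ss := by
    cases h : split0 cs with
    | nil => exact absurd h (split0_ne_nil cs)
    | cons s ss => exact ⟨s, ss, rfl⟩
  simp [hss, consHead]

lemma split0_len_one_iff (cs : List Char) : (split0 cs).length = 1 ↔ '0' ∉ cs := by
  induction cs with
  | nil => simp [split0]
  | cons c rest ih =>
    simp only [split0]
    by_cases hc : c = '0'
    · subst hc
      have := split0_ne_nil rest
      rw [if_pos rfl]
      constructor
      · intro h; exfalso; simp [List.length_eq_zero_iff] at h; exact this h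
      · intro h; exact absurd (by simp : '0' ∈ '0' :: rest) h
    · rw [if_neg hc]
      cases h : split0 rest with
      | nil => exact absurd h (split0_ne_nil rest)
      | cons s ss =>
        rw [h] at ih
        simp only [List.length_cons] at ih ⊢
        simp only [List.mem_cons, not_or]
        constructor
        · intro hss
          refine ⟨fun h => hc h.symm, ih.mp (by simp [hss])⟩
        · intro ⟨_, hmem⟩
          simpa using ih.mpr hmem

lemma isIn_zero_iff (cs : List Char) : PySem.Chars.isIn ['0'] cs = true ↔ '0' ∈ cs := by
  have hinfix : (['0'] <:+: cs) ↔ '0' ∈ cs := by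
    constructor
    · intro h; exact h.sublist.mem (by simp)
    · intro h
      obtain ⟨s, t, hst⟩ := List.append_of_mem h
      exact ⟨s, t, by simp [hst]⟩
  have hfind : PySem.Chars.find cs ['0'] = -1 ↔ ¬ (['0'] <:+: cs) := by
    have h0 : ((0 : Nat) : Int) = (0 : Int) := by simp
    have := PySem.Chars.findFrom_natCast_eq_neg_one_iff cs ['0'] 0 (Nat.zero_le _)
    rw [h0, PySem.Chars.findFrom_zero] at this
    simpa using this
  unfold PySem.Chars.isIn
  constructor
  · intro h
    by_contra hmem
    rw [← hinfix] at hmem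
    rw [hfind.mpr hmem] at h
    simp at h
  · intro h
    have := hfind
    simp only [bne_iff_ne, ne_eq]
    intro heq
    exact (hfind.mp heq) (hinfix.mpr h)

-- max over adjacent pairs of run lengths, A's accumulator
def pairMaxL (acc : Int) : List Int → Int
  | a :: b :: r => pairMaxL (max acc (a + 1 + b)) (b :: r)
  | _ => acc

lemma foldA_eq_pairMaxL (segs : List (List Char)) : ∀ (acc : Int),
    List.foldl
      (fun m (k : Nat) =>
        max m ((((segs.getD k []).length : Int) + 1 + ((segs.getD (k+1) []).length : Int))))
      acc (List.range (segs.length - 1))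
    = pairMaxL acc (segs.map (fun s => (s.length : Int))) := by
  induction segs with
  | nil => intro acc; simp [pairMaxL]
  | cons s rest ih =>
    intro acc
    cases rest with
    | nil => simp [pairMaxL]
    | cons t r =>
      have hlen : (s :: t :: r).length - 1 = r.length + 1 := by simp
      rw [hlen, List.range_succ_eq_map, List.foldl_cons, List.foldl_map]
      have := ih (max acc ((s.length : Int) + 1 + (t.length : Int)))
      have hr : (t :: r).length - 1 = r.length := by simp
      rw [hr] at this
      simp only [List.getD_cons_succ, List.getD_cons_zero] at this ⊢
      rw [this]
      rfl

-- B's streaming fold, executed segment by segment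
def stateRun (st : Int × Int × Option Int) : List (List Char) → Int × Int × Option Int
  | [] => st
  | [s] => (st.1, st.2.1 + (s.length : Int), st.2.2)
  | s :: t :: r =>
    stateRun
      ((match st.2.2 with
        | some p => max st.1 (p + (st.2.1 + (s.length : Int)) + 1)
        | none => st.1), 0, some (st.2.1 + (s.length : Int))) (t :: r)

def closeB (st : Int × Int × Option Int) : Int :=
  match st.2.2 with
  | some p => max st.1 (p + st.2.1 + 1)
  | none => st.1

def stepB (st : Int × Int × Option Int) (ch : Char) : Int × Int × Option Int :=
  if ch = '0' then
    ((match st.2.2 with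
      | some p => max st.1 (p + st.2.1 + 1)
      | none => st.1), 0, some st.2.1)
  else (st.1, st.2.1 + 1, st.2.2)

lemma foldB_eq_stateRun (cs : List Char) : ∀ (st : Int × Int × Option Int),
    cs.foldl stepB st = stateRun st (split0 cs) := by
  induction cs with
  | nil => intro st; simp [split0, stateRun]
  | cons c rest ih =>
    intro st
    obtain ⟨b, cu, pr⟩ := st
    obtain ⟨s, ss, hss⟩ : ∃ s ss, split0 rest = s :: ss := by
      cases h : split0 rest with
      | nil => exact absurd h (split0_ne_nil rest)
      | cons s ss => exact ⟨s, ss, rfl⟩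
    rw [List.foldl_cons, ih]
    by_cases hc : c = '0'
    · subst hc
      have h1 : split0 ('0' :: rest) = [] :: s :: ss := by simp [split0, hss]
      rw [h1, hss]
      have h2 : stepB (b, cu, pr) '0' =
          ((match pr with
            | some p => max b (p + (cu + (([] : List Char).length : Int)) + 1)
            | none => b),
           0, some (cu + (([] : List Char).length : Int))) := by
        cases pr <;> simp [stepB]
      rw [h2]
      rfl
    · have h1 : split0 (c :: rest) = (c :: s) :: ss := by simp [split0, hc, hss]
      rw [h1, hss]
      have h2 : stepB (b, cu, pr) c = (b, cu + 1, pr) := by simp [stepB, hc]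
      rw [h2]
      have harg : (cu + 1) + (s.length : Int) = cu + (((c :: s).length : Int)) := by
        push_cast [List.length_cons]; ring
      cases ss with
      | nil =>
        show (b, (cu + 1) + (s.length : Int), pr) = (b, cu + (((c :: s).length : Int)), pr)
        rw [harg]
      | cons t r =>
        simp only [stateRun]
        rw [harg]

lemma closeB_stateRun (rest : List (List Char)) : ∀ (s : List Char) (b q : Int),
    closeB (stateRun (b, 0, some q) (s :: rest))
    = pairMaxL b (q :: (s.length : Int) :: rest.map (fun t => (t.length : Int))) := by
  induction rest with
  | nil =>
    intro s b q
    show max b (q + (0 + (s.length : Int)) + 1) = max b (q + 1 + (s.length : Int))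
    congr 1; ring
  | cons t r ih =>
    intro s b q
    have h0 : ((0 : Int) + (s.length : Int)) = (s.length : Int) := by ring
    have hmax : max b (q + (s.length : Int) + 1) = max b (q + 1 + (s.length : Int)) := by
      congr 1; ring
    show closeB (stateRun
        (max b (q + (0 + (s.length : Int)) + 1), 0, some (0 + (s.length : Int))) (t :: r)) = _
    rw [ih t (max b (q + (0 + (s.length : Int)) + 1)) (0 + (s.length : Int)), h0, hmax]
    rfl

lemma main_eq (cs : List Char) :
    (let segments := PySem.Chars.splitOn cs ['0']
     if PySem.List.len segments = 1 then PySem.List.len cs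
     else
       (PySem.List.pyRange 0 (PySem.List.len segments - 1) 1).foldl
         (fun max_length i =>
           let combined_length :=
             PySem.List.len (PySem.List.pyGetD segments i []) + 1 +
             PySem.List.len (PySem.List.pyGetD segments (i + 1) [])
           max max_length combined_length) 0)
    = (if PySem.Chars.isIn ['0'] cs = false then PySem.List.len cs
       else
         closeB (cs.foldl stepB (0, 0, none))) := by
  rw [splitOn_eq_split0]
  by_cases h0 : '0' ∈ cs
  · -- both take the main branch
    have hIn : PySem.Chars.isIn ['0'] cs = true := (isIn_zero_iff cs).mpr h0
    have hlen : (split0 cs).length ≠ 1 := fun h => (split0_len_one_iff cs).mp h h0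
    obtain ⟨s, ss, hss⟩ : ∃ s ss, split0 cs = s :: ss := by
      cases h : split0 cs with
      | nil => exact absurd h (split0_ne_nil cs)
      | cons s ss => exact ⟨s, ss, rfl⟩
    obtain ⟨t, r, hr⟩ : ∃ t r, ss = t :: r := by
      cases ss with
      | nil => exact absurd (by simp [hss]) hlen
      | cons t r => exact ⟨t, r, rfl⟩
    subst hr
    have hcond : ¬ (PySem.List.len (split0 cs) = 1) := by
      simp only [PySem.List.len_eq]
      intro h
      exact hlen (by exact_mod_cast h)
    rw [if_neg hcond, hIn]
    simp only [Bool.true_eq_false, if_false]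
    -- A side: pyRange fold to nat-range fold to pairMaxL
    have hA :
        (PySem.List.pyRange 0 (PySem.List.len (split0 cs) - 1) 1).foldl
          (fun max_length i =>
            let combined_length :=
              PySem.List.len (PySem.List.pyGetD (split0 cs) i []) + 1 +
              PySem.List.len (PySem.List.pyGetD (split0 cs) (i + 1) [])
            max max_length combined_length) 0
        = pairMaxL 0 ((split0 cs).map (fun u => (u.length : Int))) := by
      rw [← foldA_eq_pairMaxL (split0 cs) 0]
      have hb : PySem.List.len (split0 cs) - 1 = (((split0 cs).length - 1 : Nat) : Int) := by
        rw [PySem.List.len_eq]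
        rw [hss]
        push_cast [List.length_cons]
        ring
      rw [hb, PySem.List.pyRange_one]
      have htoNat : ((((split0 cs).length - 1 : Nat) : Int) - 0).toNat = (split0 cs).length - 1 := by
        simp
      rw [htoNat, List.foldl_map]
      apply List.foldl_ext
      intro m k _
      simp only [zero_add]
      have h1 : PySem.List.pyGetD (split0 cs) (k : Int) [] = (split0 cs).getD k [] :=
        PySem.List.pyGetD_natCast _ _ _
      have h2 : PySem.List.pyGetD (split0 cs) ((k : Int) + 1) [] = (split0 cs).getD (k + 1) [] := by
        rw [show ((k : Int) + 1) = ((k + 1 : Nat) : Int) by push_cast; ring]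
        exact PySem.List.pyGetD_natCast _ _ _
      simp [h1, h2, PySem.List.len_eq]
    rw [hA]
    -- B side
    rw [foldB_eq_stateRun cs (0, 0, none), hss]
    simp only [stateRun]
    rw [closeB_stateRun r t 0 (0 + (s.length : Int))]
    simp [pairMaxL]
  · -- no '0': both return len
    have hIn : PySem.Chars.isIn ['0'] cs = false := by
      cases h : PySem.Chars.isIn ['0'] cs
      · rfl
      · exact absurd ((isIn_zero_iff cs).mp h) h0
    have hlen : (split0 cs).length = 1 := (split0_len_one_iff cs).mpr h0
    have hcond : PySem.List.len (split0 cs) = 1 := by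
      simp [PySem.List.len_eq, hlen]
    rw [hIn, if_pos hcond]
    simp

-- ===== VERDICT (by name: the statement is the Claim_ definition above) =====
theorem flip_bit_to_win_spec : Claim_equal_flip_bit_to_win := by
  intro x _
  unfold Spec_flip_bit_to_win flip_bit_to_win flip_bit_to_win_alt
  have := main_eq (PySem.Chars.slice (PySem.Int.toBinChars0b x) (some 2) none)
  simp only at this
  rw [this]
  rfl
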